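-- pv_equiv track=rewrite | github.com/ClementTsang/aoc_2022 | day_25/day_25.py | part_one
-- ===== SOURCE A (Python) =====
-- def part_one(input):
--     ret = 0
--
--     for i in input:
--         s = 0
--         for (itx, c) in enumerate(i.strip()[::-1]):
--             place = 5**itx
--             if c == "-":
--                 v = -1
--             elif c == "=":
--                 v = -2
--             else:
--                 v = int(c)
--             s += place * v
--         ret += s
--
--     snafu = []
--     while ret != 0:
--         curr = ret % 5
--
--         match curr:
--             case 0:
--                 snafu.append("0")
--                 ret //= 5
--             case 1:
--                 snafu.append("1")
--                 ret -= 1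
--                 ret //= 5
--             case 2:
--                 snafu.append("2")
--                 ret -= 2
--                 ret //= 5
--             case 3:
--                 snafu.append("=")
--                 ret += 2
--                 ret //= 5
--             case 4:
--                 snafu.append("-")
--                 ret += 1
--                 ret //= 5
--
--     return "".join(snafu[::-1])
-- ===== SOURCE B (Python) =====
-- def _add(a, b):
--     # digit-wise balanced-quinary addition of two LSB-first digit lists
--     if len(a) < len(b):
--         a, b = b, a
--     b = b + [0] * (len(a) - len(b))
--     out = []
--     carry = 0
--     for x, y in zip(a, b):
--         d = x + y + carry
--         rem = (d + 2) % 5 - 2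
--         out.append(rem)
--         carry = (d - rem) // 5
--     while carry != 0:
--         rem = (carry + 2) % 5 - 2
--         out.append(rem)
--         carry = (carry - rem) // 5
--     return out
--
--
-- def part_one(input):
--     # running sum kept as a balanced-quinary digit list, least significant first;
--     # no line is ever turned into an integer and no division loop runs on a total
--     total = []
--     for line in input:
--         digits = [(-1 if c == "-" else -2 if c == "=" else int(c))
--                   for c in reversed(line.strip())]
--         total = _add(digits, total)
--     while total and total[-1] == 0:
--         total.pop()
--     return "".join("=-012"[d + 2] for d in reversed(total))
-- ===== Notes on version B (the rewrite author's own statement) =====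
-- stated objective: alternative
-- what changed: B never converts anything to a single integer: it keeps the running sum as a balanced-quinary digit list and folds each parsed line into it with digit-wise carry addition, so A's place-value evaluation (5**itx) and A's repeated-division match loop both disappear; the final string is just the stripped digit list rendered in reverse.
import Mathlib
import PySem

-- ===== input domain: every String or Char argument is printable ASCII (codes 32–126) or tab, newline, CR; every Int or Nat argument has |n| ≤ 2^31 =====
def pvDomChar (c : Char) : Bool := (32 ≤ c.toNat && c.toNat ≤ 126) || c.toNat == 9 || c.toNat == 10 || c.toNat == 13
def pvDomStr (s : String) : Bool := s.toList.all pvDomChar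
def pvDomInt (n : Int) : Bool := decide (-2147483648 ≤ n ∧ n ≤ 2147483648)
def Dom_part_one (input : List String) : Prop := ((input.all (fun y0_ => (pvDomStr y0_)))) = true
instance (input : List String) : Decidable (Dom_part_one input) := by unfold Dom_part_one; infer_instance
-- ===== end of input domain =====

-- B keeps the running sum as a balanced-quinary digit list and adds digit-wise with
-- carries, so neither the place-value evaluation nor the repeated-division loop of A
-- exists in B; objective: alternative (same asymptotic cost).

-- ===== PORT A =====
-- v for one digit char; int(c) raises ValueError on non-digits: those inputs are
-- excluded by Pre_, there the port defaults to 0.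
-- the inner 'for (itx, c) in enumerate(i.strip()[::-1]):' with the if/elif/else chain
-- for v written inline; 's += 5**itx * v'
def pvParseA (i : String) : Int :=
  let r := (PySem.Str.slice? (PySem.Str.strip i) none none (-1)).getD ""
  (PySem.List.enumerate r.toList 0).foldl
    (fun s p =>
      s + 5 ^ p.1.toNat *
        (if p.2 = '-' then -1
         else if p.2 = '=' then -2
         else (PySem.Int.ofStr? (String.ofList [p.2])).getD 0)) 0

-- the 'while ret != 0' match loop on curr = ret % 5, appending digit strings to snafu.
-- fuel only makes the loop total; |ret| strictly decreases each step, so fuel = ret.natAbs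
-- (supplied at the call site) is always enough and the guard is never what stops the loop.
def pvSnafuA (fuel : Nat) (ret : Int) (snafu : List String) : List String :=
  match fuel with
  | 0 => snafu
  | fuel + 1 =>
    if ret = 0 then snafu
    else
      if PySem.Int.mod ret 5 = 0 then pvSnafuA fuel (PySem.Int.floordiv ret 5) (snafu ++ ["0"])
      else if PySem.Int.mod ret 5 = 1 then pvSnafuA fuel (PySem.Int.floordiv (ret - 1) 5) (snafu ++ ["1"])
      else if PySem.Int.mod ret 5 = 2 then pvSnafuA fuel (PySem.Int.floordiv (ret - 2) 5) (snafu ++ ["2"])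
      else if PySem.Int.mod ret 5 = 3 then pvSnafuA fuel (PySem.Int.floordiv (ret + 2) 5) (snafu ++ ["="])
      else pvSnafuA fuel (PySem.Int.floordiv (ret + 1) 5) (snafu ++ ["-"])

def part_one (input : List String) : String :=
  let ret := input.foldl (fun ret i => ret + pvParseA i) 0
  PySem.Str.join "" ((pvSnafuA ret.natAbs ret []).reverse)

-- ===== PORT B =====
-- the digit value of one char (same ValueError caveat as in A's port)
def pvDig (c : Char) : Int :=
  if c = '-' then -1
  else if c = '=' then -2
  else (PySem.Int.ofStr? (String.ofList [c])).getD 0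

-- '"=-012"[d + 2]' (d is always in -2..2, so the lookup never misses)
def pvChr (d : Int) : Char := (PySem.Str.pyGet? "=-012" (d + 2)).getD ' '

-- the trailing 'while carry != 0' loop of _add; |carry| strictly decreases
def pvDrain (carry : Int) (out : List Int) : List Int :=
  if _h : carry = 0 then out
  else
    let rem := PySem.Int.mod (carry + 2) 5 - 2
    pvDrain (PySem.Int.floordiv (carry - rem) 5) (out ++ [rem])
termination_by carry.natAbs
decreasing_by
  simp only [PySem.Int.mod_eq_emod_of_pos (by norm_num : (0:Int) < 5),
    PySem.Int.floordiv_eq_ediv_of_pos (by norm_num : (0:Int) < 5)]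
  omega

-- the 'for x, y in zip(a, b)' body of _add, state = (out, carry)
def pvAddStep (s : List Int × Int) (p : Int × Int) : List Int × Int :=
  let d := p.1 + p.2 + s.2
  let rem := PySem.Int.mod (d + 2) 5 - 2
  (s.1 ++ [rem], PySem.Int.floordiv (d - rem) 5)

def pvAdd (a b : List Int) : List Int :=
  let ab := if a.length < b.length then (b, a) else (a, b)
  let b' := ab.2 ++ List.replicate (ab.1.length - ab.2.length) 0
  let oc := (ab.1.zip b').foldl pvAddStep ([], 0)
  pvDrain oc.2 oc.1

-- 'while total and total[-1] == 0: total.pop()'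
def pvStrip (d : List Int) : List Int :=
  if d ≠ [] ∧ d.getLastD 0 = 0 then pvStrip d.dropLast else d
termination_by d.length
decreasing_by
  rename_i h
  have : d ≠ [] := h.1
  simp [List.length_dropLast]
  cases d with
  | nil => exact absurd rfl this
  | cons x t => simp

def part_one_alt (input : List String) : String :=
  let total := input.foldl
    (fun total line => pvAdd ((PySem.Str.strip line).toList.reverse.map pvDig) total) []
  String.ofList ((pvStrip total).reverse.map pvChr)

-- ===== PRECONDITION & SPEC =====
-- Pre_ excludes inputs where some stripped character is not an ASCII digit, '-' or '=':
-- there Python's int(c) raises ValueError (in A and in B alike).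
def Pre_part_one (input : List String) : Prop :=
  (input.all (fun i =>
    (PySem.Str.strip i).toList.all (fun c => c == '-' || c == '=' || c.isDigit))) = true
instance (input : List String) : Decidable (Pre_part_one input) := by
  unfold Pre_part_one; infer_instance

def pvWitness_part_one : List String := ["1=", " 12 ", "2-0"]

def Spec_part_one (input : List String) (out : String) : Prop := out = part_one_alt input
instance (input : List String) (out : String) : Decidable (Spec_part_one input out) := by
  unfold Spec_part_one; infer_instance

-- ===== CLAIM (what is proved, stated in full; the proofs are below) =====
def Claim_equal_part_one : Prop :=
  ∀ (input : List String), Dom_part_one input → Pre_part_one input →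
    Spec_part_one input (part_one input)

-- ===== LEMMAS AND PROOFS =====

-- value of an LSB-first digit list
def pvVal (l : List Int) : Int := l.foldr (fun d acc => d + 5 * acc) 0

-- all digits balanced (in -2..2)
def pvBnd (l : List Int) : Prop := ∀ x ∈ l, -2 ≤ x ∧ x ≤ 2

theorem pvVal_nil : pvVal [] = 0 := rfl
theorem pvVal_cons (x : Int) (l : List Int) : pvVal (x :: l) = x + 5 * pvVal l := rfl

theorem pvVal_append (l m : List Int) :
    pvVal (l ++ m) = pvVal l + 5 ^ l.length * pvVal m := by
  induction l with
  | nil => simp [pvVal]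
  | cons x t ih => simp [pvVal_cons, ih, pow_succ]; ring

theorem pvVal_replicate_zero (k : Nat) : pvVal (List.replicate k 0) = 0 := by
  induction k with
  | zero => rfl
  | succ k ih => simp [List.replicate_succ, pvVal_cons, ih]

-- the two modular quantities used everywhere
theorem pvRemCarry (d : Int) :
    (PySem.Int.mod (d + 2) 5 - 2) + 5 * PySem.Int.floordiv (d - (PySem.Int.mod (d + 2) 5 - 2)) 5 = d
    ∧ -2 ≤ PySem.Int.mod (d + 2) 5 - 2 ∧ PySem.Int.mod (d + 2) 5 - 2 ≤ 2 := by
  rw [PySem.Int.mod_eq_emod_of_pos (by norm_num : (0:Int) < 5),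
    PySem.Int.floordiv_eq_ediv_of_pos (by norm_num : (0:Int) < 5)]
  omega

theorem pvDrain_spec (carry : Int) (out : List Int) :
    pvVal (pvDrain carry out) = pvVal out + 5 ^ out.length * carry
    ∧ (pvBnd out → pvBnd (pvDrain carry out)) := by
  induction carry, out using pvDrain.induct with
  | case1 out => simp [pvDrain]
  | case2 c out h rem ih =>
    rw [pvDrain]; simp only [h, dite_false]
    obtain ⟨hv, hb⟩ := ih
    have h5 : rem + 5 * PySem.Int.floordiv (c - rem) 5 = c ∧ -2 ≤ rem ∧ rem ≤ 2 :=
      pvRemCarry c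
    constructor
    · rw [hv, pvVal_append]
      simp only [List.length_append, List.length_cons, List.length_nil, pvVal_cons, pvVal_nil,
        pow_succ]
      linear_combination (5 ^ out.length : Int) * h5.1
    · intro hout
      apply hb
      intro x hx
      rcases List.mem_append.mp hx with hx | hx
      · exact hout x hx
      · simp only [List.mem_cons, List.not_mem_nil, or_false] at hx
        rw [hx]
        exact h5.2

theorem pvAddLoop_spec (l : List (Int × Int)) : ∀ (out : List Int) (carry : Int),
    pvVal (l.foldl pvAddStep (out, carry)).1
        + 5 ^ (l.foldl pvAddStep (out, carry)).1.length * (l.foldl pvAddStep (out, carry)).2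
      = pvVal out + 5 ^ out.length * (carry + pvVal (l.map (fun p => p.1 + p.2)))
    ∧ (pvBnd out → pvBnd (l.foldl pvAddStep (out, carry)).1) := by
  induction l with
  | nil => intro out carry; simp [pvVal]
  | cons p t ih =>
    intro out carry
    simp only [List.foldl_cons, List.map_cons, pvVal_cons, pvAddStep]
    obtain ⟨hv, hb⟩ := ih (out ++ [PySem.Int.mod (p.1 + p.2 + carry + 2) 5 - 2])
      (PySem.Int.floordiv (p.1 + p.2 + carry - (PySem.Int.mod (p.1 + p.2 + carry + 2) 5 - 2)) 5)
    have h5 := pvRemCarry (p.1 + p.2 + carry)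
    constructor
    · rw [hv, pvVal_append]
      simp only [List.length_append, List.length_cons, List.length_nil, pvVal_cons, pvVal_nil,
        pow_succ]
      linear_combination (5 ^ out.length : Int) * h5.1
    · intro hout
      apply hb
      intro x hx
      rcases List.mem_append.mp hx with hx | hx
      · exact hout x hx
      · simp only [List.mem_cons, List.not_mem_nil, or_false] at hx
        rw [hx]
        exact h5.2

theorem pvVal_zip_add (a : List Int) : ∀ (b : List Int), a.length = b.length →
    pvVal ((a.zip b).map (fun p => p.1 + p.2)) = pvVal a + pvVal b := by
  induction a with
  | nil => intro b h; simp [pvVal] at *; rw [List.eq_nil_of_length_eq_zero h.symm]; rfl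
  | cons x t ih =>
    intro b h
    cases b with
    | nil => simp at h
    | cons y u =>
      simp only [List.zip_cons_cons, List.map_cons, pvVal_cons]
      rw [ih u (by simpa using h)]
      ring

theorem pvCore_spec (x y : List Int) (h : y.length ≤ x.length) :
    pvVal (pvDrain
        ((x.zip (y ++ List.replicate (x.length - y.length) 0)).foldl pvAddStep ([], 0)).2
        ((x.zip (y ++ List.replicate (x.length - y.length) 0)).foldl pvAddStep ([], 0)).1)
      = pvVal x + pvVal y
    ∧ pvBnd (pvDrain
        ((x.zip (y ++ List.replicate (x.length - y.length) 0)).foldl pvAddStep ([], 0)).2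
        ((x.zip (y ++ List.replicate (x.length - y.length) 0)).foldl pvAddStep ([], 0)).1) := by
  have hlen : x.length = (y ++ List.replicate (x.length - y.length) 0).length := by
    simp; omega
  have hvy : pvVal (y ++ List.replicate (x.length - y.length) 0) = pvVal y := by
    rw [pvVal_append, pvVal_replicate_zero]; ring
  obtain ⟨h1, h2⟩ := pvAddLoop_spec (x.zip (y ++ List.replicate (x.length - y.length) 0)) [] 0
  obtain ⟨h3, h4⟩ := pvDrain_spec
    ((x.zip (y ++ List.replicate (x.length - y.length) 0)).foldl pvAddStep ([], 0)).2
    ((x.zip (y ++ List.replicate (x.length - y.length) 0)).foldl pvAddStep ([], 0)).1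
  refine ⟨?_, h4 (h2 (by intro z hz; simp at hz))⟩
  rw [h3, h1, pvVal_zip_add x _ hlen, hvy]
  simp [pvVal]

theorem pvAdd_spec (a b : List Int) :
    pvVal (pvAdd a b) = pvVal a + pvVal b ∧ pvBnd (pvAdd a b) := by
  by_cases h : a.length < b.length
  · have hc := pvCore_spec b a (le_of_lt h)
    have he : pvAdd a b
        = pvDrain
            ((b.zip (a ++ List.replicate (b.length - a.length) 0)).foldl pvAddStep ([], 0)).2
            ((b.zip (a ++ List.replicate (b.length - a.length) 0)).foldl pvAddStep ([], 0)).1 := by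
      unfold pvAdd
      rw [if_pos h]
    rw [he]
    exact ⟨hc.1.trans (add_comm _ _), hc.2⟩
  · have hc := pvCore_spec a b (not_lt.mp h)
    have he : pvAdd a b
        = pvDrain
            ((a.zip (b ++ List.replicate (a.length - b.length) 0)).foldl pvAddStep ([], 0)).2
            ((a.zip (b ++ List.replicate (a.length - b.length) 0)).foldl pvAddStep ([], 0)).1 := by
      unfold pvAdd
      rw [if_neg h]
    rw [he]
    exact hc

-- ---- the parse bridge: A's enumerate/power sum = pvVal of the reversed digit list ----

theorem pvHorner (l : List Char) : ∀ (n : Nat) (s : Int),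
    (PySem.List.enumerate l (n : Int)).foldl
        (fun s p => s + 5 ^ p.1.toNat * pvDig p.2) s
      = s + 5 ^ n * pvVal (l.map pvDig) := by
  induction l with
  | nil => intro n s; simp [PySem.List.enumerate_nil, pvVal]
  | cons c t ih =>
    intro n s
    rw [PySem.List.enumerate_cons, List.foldl_cons]
    have : ((n : Int) + 1) = ((n + 1 : Nat) : Int) := by push_cast; ring
    rw [this, ih (n + 1)]
    simp only [List.map_cons, pvVal_cons, Int.toNat_natCast, pow_succ]
    ring

theorem pvParse_eq (i : String) :
    pvParseA i = pvVal ((PySem.Str.strip i).toList.reverse.map pvDig) := by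
  unfold pvParseA
  rw [show (fun (s : Int) (p : Int × Char) =>
        s + 5 ^ p.1.toNat *
          (if p.2 = '-' then -1
           else if p.2 = '=' then -2
           else (PySem.Int.ofStr? (String.ofList [p.2])).getD 0))
      = (fun (s : Int) (p : Int × Char) => s + 5 ^ p.1.toNat * pvDig p.2) from rfl]
  rw [PySem.Str.slice?_none_none_neg_one]
  have h := pvHorner (PySem.Str.strip i).toList.reverse 0 0
  simp at h ⊢
  rw [h]

-- ---- strip lemmas ----

theorem pvStrip_nil : pvStrip [] = [] := by rw [pvStrip]; simp

theorem pvStrip_append (l : List Int) (x : Int) :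
    pvStrip (l ++ [x]) = if x = 0 then pvStrip l else l ++ [x] := by
  rw [pvStrip]
  by_cases hx : x = 0 <;> simp [hx]

theorem pvStrip_cons (x : Int) (r : List Int) :
    pvStrip (x :: r) = if pvStrip r = [] ∧ x = 0 then [] else x :: pvStrip r := by
  induction r using List.reverseRecOn with
  | nil =>
    rw [show (x :: ([] : List Int)) = [] ++ [x] from rfl, pvStrip_append, pvStrip_nil]
    by_cases hx : x = 0 <;> simp [hx]
  | append_singleton t y ih =>
    rw [show x :: (t ++ [y]) = (x :: t) ++ [y] from rfl, pvStrip_append, pvStrip_append]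
    by_cases hy : y = 0
    · simp only [hy, if_true, ih]
    · simp [hy]

theorem pvStrip_val (l : List Int) : pvVal (pvStrip l) = pvVal l := by
  induction l using List.reverseRecOn with
  | nil => rw [pvStrip_nil]
  | append_singleton t y ih =>
    rw [pvStrip_append]
    by_cases hy : y = 0
    · simp only [hy, if_true, ih, pvVal_append]
      simp [pvVal]
    · simp [hy]

theorem pvStrip_of_zero (l : List Int) (hb : pvBnd l) (hv : pvVal l = 0) :
    pvStrip l = [] := by
  induction l with
  | nil => exact pvStrip_nil
  | cons x t ih =>
    rw [pvVal_cons] at hv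
    have hx := hb x (by simp)
    have hx0 : x = 0 := by omega
    have ht : pvVal t = 0 := by omega
    have := ih (fun y hy => hb y (by simp [hy])) ht
    rw [pvStrip_cons, this]
    simp [hx0]

-- ---- A's while-loop on the value of a balanced digit list yields the stripped digits ----

theorem pvSnafuA_eq (n : Nat) : ∀ (d : List Int) (acc : List String),
    pvBnd d → (pvVal d).natAbs ≤ n →
    pvSnafuA n (pvVal d) acc
      = acc ++ (pvStrip d).map (fun x => String.ofList [pvChr x]) := by
  induction n with
  | zero =>
    intro d acc hb hn
    have h0 : pvVal d = 0 := by omega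
    rw [pvStrip_of_zero d hb h0]
    simp [pvSnafuA]
  | succ n ih =>
    intro d acc hb hn
    by_cases h0 : pvVal d = 0
    · rw [pvStrip_of_zero d hb h0, h0]
      simp [pvSnafuA]
    · cases d with
      | nil => exact absurd rfl h0
      | cons x r =>
        obtain ⟨hx1, hx2⟩ := hb x (by simp)
        have hbr : pvBnd r := fun y hy => hb y (by simp [hy])
        have hvc : pvVal (x :: r) = x + 5 * pvVal r := pvVal_cons x r
        have hrz : ¬ (pvStrip r = [] ∧ x = 0) := by
          rintro ⟨h1, h2⟩
          have := pvStrip_val r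
          rw [h1] at this
          apply h0
          rw [hvc, h2, ← this]
          simp [pvVal]
        rw [pvStrip_cons, if_neg hrz, List.map_cons]
        have hmod : PySem.Int.mod (pvVal (x :: r)) 5 = (pvVal (x :: r)) % 5 :=
          PySem.Int.mod_eq_emod_of_pos (by norm_num)
        have hfd : ∀ z : Int, PySem.Int.floordiv z 5 = z / 5 :=
          fun z => PySem.Int.floordiv_eq_ediv_of_pos (by norm_num)
        have hn' : (pvVal r).natAbs ≤ n := by
          rw [hvc] at hn h0; omega
        rw [pvSnafuA]
        simp only [if_neg h0, hmod, hfd]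
        interval_cases x
        · -- x = -2 : v % 5 = 3, digit "="
          have hm : pvVal (-2 :: r) % 5 = 3 := by rw [hvc]; omega
          have hq : (pvVal (-2 :: r) + 2) / 5 = pvVal r := by rw [hvc]; omega
          simp only [hm, hq]
          norm_num
          rw [ih r (acc ++ ["="]) hbr hn']
          simp [pvChr, PySem.Str.pyGet?]
        · -- x = -1 : v % 5 = 4, digit "-"
          have hm : pvVal (-1 :: r) % 5 = 4 := by rw [hvc]; omega
          have hq : (pvVal (-1 :: r) + 1) / 5 = pvVal r := by rw [hvc]; omega
          simp only [hm, hq]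
          norm_num
          rw [ih r (acc ++ ["-"]) hbr hn']
          simp [pvChr, PySem.Str.pyGet?]
        · -- x = 0
          have hm : pvVal (0 :: r) % 5 = 0 := by rw [hvc]; omega
          have hq : pvVal (0 :: r) / 5 = pvVal r := by rw [hvc]; omega
          simp only [hm, hq]
          norm_num
          rw [ih r (acc ++ ["0"]) hbr hn']
          simp [pvChr, PySem.Str.pyGet?]
        · -- x = 1
          have hm : pvVal (1 :: r) % 5 = 1 := by rw [hvc]; omega
          have hq : (pvVal (1 :: r) - 1) / 5 = pvVal r := by rw [hvc]; omega
          simp only [hm, hq]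
          norm_num
          rw [ih r (acc ++ ["1"]) hbr hn']
          simp [pvChr, PySem.Str.pyGet?]
        · -- x = 2
          have hm : pvVal (2 :: r) % 5 = 2 := by rw [hvc]; omega
          have hq : (pvVal (2 :: r) - 2) / 5 = pvVal r := by rw [hvc]; omega
          simp only [hm, hq]
          norm_num
          rw [ih r (acc ++ ["2"]) hbr hn']
          simp [pvChr, PySem.Str.pyGet?]

-- ---- the fold over the input lines ----

theorem pvTotal_spec (input : List String) : ∀ (acc : List Int), pvBnd acc →
    pvBnd (input.foldl
        (fun total line => pvAdd ((PySem.Str.strip line).toList.reverse.map pvDig) total) acc)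
    ∧ pvVal (input.foldl
        (fun total line => pvAdd ((PySem.Str.strip line).toList.reverse.map pvDig) total) acc)
      = input.foldl (fun ret i => ret + pvParseA i) (pvVal acc) := by
  induction input with
  | nil => intro acc h; exact ⟨h, rfl⟩
  | cons i t ih =>
    intro acc h
    simp only [List.foldl_cons]
    obtain ⟨hv, hb⟩ := pvAdd_spec ((PySem.Str.strip i).toList.reverse.map pvDig) acc
    obtain ⟨h1, h2⟩ := ih _ hb
    refine ⟨h1, ?_⟩
    rw [h2, hv, pvParse_eq]
    ring_nf

-- ===== VERDICT (by name: the statement is the Claim_ definition above) =====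
theorem part_one_spec : Claim_equal_part_one := by
  intro input _ _
  unfold Spec_part_one part_one part_one_alt
  obtain ⟨hb, hv⟩ := pvTotal_spec input [] (by intro x hx; simp at hx)
  set T := input.foldl
    (fun total line => pvAdd ((PySem.Str.strip line).toList.reverse.map pvDig) total) []
  have hv' : input.foldl (fun ret i => ret + pvParseA i) 0 = pvVal T := by
    rw [hv]; rfl
  rw [hv']
  show PySem.Str.join "" (pvSnafuA (pvVal T).natAbs (pvVal T) []).reverse
      = String.ofList (List.map pvChr (pvStrip T).reverse)
  rw [pvSnafuA_eq (pvVal T).natAbs T [] hb (le_refl _)]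
  simp only [List.nil_append]
  apply String.toList_inj.mp
  rw [PySem.Str.toList_join]
  simp [← List.map_reverse, List.map_map, Function.comp_def]
  rw [show List.map (fun x => [pvChr x]) (pvStrip T).reverse
        = ((pvStrip T).reverse.map pvChr).map (fun c => [c]) by
      rw [List.map_map]; rfl]
  exact PySem.Chars.join_nil_singletons _
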